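-- pv_equiv track=rewrite | github.com/hndfzhanghui/SAFE-BMAD | core/agents/strategist/s_agent.py | _identify_adjustments
-- ===== SOURCE A (Python) =====
-- from typing import Dict, Any, List, Optional
--
-- def _identify_adjustments(
--
--     current_strategy: Dict[str, Any],
--     feedback_analysis: Dict[str, Any]
-- ) -> List[Dict[str, Any]]:
--     """识别需要调整的部分"""
--     adjustments = []
--
--     # 基于反馈识别调整需求
--     for issue in feedback_analysis.get('key_issues', []):
--         if 'priority' in issue.lower():
--             adjustments.append({
--                 'type': 'priority_adjustment',
--                 'description': issue,
--                 'priority': 'high'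
--             })
--         elif 'resource' in issue.lower():
--             adjustments.append({
--                 'type': 'resource_reallocation',
--                 'description': issue,
--                 'priority': 'medium'
--             })
--         elif 'timing' in issue.lower():
--             adjustments.append({
--                 'type': 'schedule_adjustment',
--                 'description': issue,
--                 'priority': 'high'
--             })
--
--     return adjustments
-- ===== SOURCE B (Python) =====
-- from typing import Dict, Any, List, Optional
--
-- RULES = [
--     ('priority', 'priority_adjustment', 'high'),
--     ('resource', 'resource_reallocation', 'medium'),
--     ('timing', 'schedule_adjustment', 'high'),
-- ]
--
-- def _identify_adjustments(
--     current_strategy: Dict[str, Any],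
--     feedback_analysis: Dict[str, Any]
-- ) -> List[Dict[str, Any]]:
--     def go(issues):
--         # recursion on the list, building the result back-to-front
--         if not issues:
--             return []
--         head, rest = issues[0], issues[1:]
--         tail = go(rest)
--         low = head.lower()
--         hits = [(t, p) for kw, t, p in RULES if kw in low]  # ALL matching rules
--         if not hits:
--             return tail
--         t, p = hits[0]  # rule-table order decides among multiple hits
--         return [{'type': t, 'description': head, 'priority': p}] + tail
--     return go(feedback_analysis.get('key_issues', []))
-- ===== Notes on version B (the rewrite author's own statement) =====
-- stated objective: alternative
-- what changed: Replaced A's accumulator loop with short-circuiting if/elif by structural recursion that builds the output back-to-front and, per issue, computes the full list of matching rules and then takes its head.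
import Mathlib
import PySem

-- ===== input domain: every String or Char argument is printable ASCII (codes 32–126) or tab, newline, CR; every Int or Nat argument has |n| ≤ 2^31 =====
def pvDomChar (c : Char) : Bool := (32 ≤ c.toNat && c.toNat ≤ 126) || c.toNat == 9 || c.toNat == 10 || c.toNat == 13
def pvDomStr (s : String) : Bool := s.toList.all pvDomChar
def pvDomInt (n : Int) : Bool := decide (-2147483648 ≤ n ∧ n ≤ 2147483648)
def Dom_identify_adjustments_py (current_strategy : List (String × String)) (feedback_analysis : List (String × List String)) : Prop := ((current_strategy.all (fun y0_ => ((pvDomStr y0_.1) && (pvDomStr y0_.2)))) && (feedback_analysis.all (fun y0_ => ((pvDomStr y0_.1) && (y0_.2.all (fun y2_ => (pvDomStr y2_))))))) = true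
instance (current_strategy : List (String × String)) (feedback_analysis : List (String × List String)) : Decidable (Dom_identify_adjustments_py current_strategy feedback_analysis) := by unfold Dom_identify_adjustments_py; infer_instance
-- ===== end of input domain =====

-- ===== PORT A =====
-- B rebuilds the output by structural recursion back-to-front, collecting all matching rules per issue and taking the head (alternative decomposition; same cost).
def identify_adjustments_py (current_strategy : List (String × String)) (feedback_analysis : List (String × List String)) : List (List (String × String)) :=
  ((PySem.Dict.mk feedback_analysis).getD "key_issues" []).foldl
    (fun adjustments issue =>
      if PySem.Str.isIn "priority" (PySem.Str.lower issue) then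
        adjustments ++ [[("type", "priority_adjustment"), ("description", issue), ("priority", "high")]]
      else if PySem.Str.isIn "resource" (PySem.Str.lower issue) then
        adjustments ++ [[("type", "resource_reallocation"), ("description", issue), ("priority", "medium")]]
      else if PySem.Str.isIn "timing" (PySem.Str.lower issue) then
        adjustments ++ [[("type", "schedule_adjustment"), ("description", issue), ("priority", "high")]]
      else adjustments) []

-- ===== PORT B =====
def pvRules : List (String × String × String) :=
  [("priority", "priority_adjustment", "high"),
   ("resource", "resource_reallocation", "medium"),
   ("timing", "schedule_adjustment", "high")]

def pvGo : List String → List (List (String × String))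
  | [] => []
  | head :: rest =>
    let tail := pvGo rest
    let low := PySem.Str.lower head
    let hits := (pvRules.filter (fun r => PySem.Str.isIn r.1 low)).map (fun r => r.2)
    match hits with
    | [] => tail
    | (t, p) :: _ => [("type", t), ("description", head), ("priority", p)] :: tail

def identify_adjustments_py_alt (current_strategy : List (String × String)) (feedback_analysis : List (String × List String)) : List (List (String × String)) :=
  pvGo ((PySem.Dict.mk feedback_analysis).getD "key_issues" [])

-- ===== PRECONDITION & SPEC =====
def Spec_identify_adjustments_py (current_strategy : List (String × String)) (feedback_analysis : List (String × List String)) (out : List (List (String × String))) : Prop := out = identify_adjustments_py_alt current_strategy feedback_analysis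
instance (current_strategy : List (String × String)) (feedback_analysis : List (String × List String)) (out : List (List (String × String))) : Decidable (Spec_identify_adjustments_py current_strategy feedback_analysis out) := by unfold Spec_identify_adjustments_py; infer_instance

-- ===== CLAIM (what is proved, stated in full; the proofs are below) =====
def Claim_equal_identify_adjustments_py : Prop := ∀ (current_strategy : List (String × String)) (feedback_analysis : List (String × List String)), Dom_identify_adjustments_py current_strategy feedback_analysis → Spec_identify_adjustments_py current_strategy feedback_analysis (identify_adjustments_py current_strategy feedback_analysis)

-- ===== LEMMAS AND PROOFS =====

-- One step of A's cascade produces exactly B's head-of-all-hits dict (as cons vs append on the accumulator).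
theorem step_eq (issue : String) (acc : List (List (String × String))) :
    (if PySem.Str.isIn "priority" (PySem.Str.lower issue) then
        acc ++ [[("type", "priority_adjustment"), ("description", issue), ("priority", "high")]]
      else if PySem.Str.isIn "resource" (PySem.Str.lower issue) then
        acc ++ [[("type", "resource_reallocation"), ("description", issue), ("priority", "medium")]]
      else if PySem.Str.isIn "timing" (PySem.Str.lower issue) then
        acc ++ [[("type", "schedule_adjustment"), ("description", issue), ("priority", "high")]]
      else acc) =
    acc ++ pvGo [issue] := by
  simp only [pvGo, pvRules, List.filter]
  split_ifs with h1 h2 h3 <;> simp_all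

-- The accumulator loop equals acc ++ the recursive back-to-front build.
theorem foldl_eq_pvGo (issues : List String) (acc : List (List (String × String))) :
    issues.foldl
      (fun adjustments issue =>
        if PySem.Str.isIn "priority" (PySem.Str.lower issue) then
          adjustments ++ [[("type", "priority_adjustment"), ("description", issue), ("priority", "high")]]
        else if PySem.Str.isIn "resource" (PySem.Str.lower issue) then
          adjustments ++ [[("type", "resource_reallocation"), ("description", issue), ("priority", "medium")]]
        else if PySem.Str.isIn "timing" (PySem.Str.lower issue) then
          adjustments ++ [[("type", "schedule_adjustment"), ("description", issue), ("priority", "high")]]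
        else adjustments) acc =
    acc ++ pvGo issues := by
  induction issues generalizing acc with
  | nil => simp [pvGo]
  | cons i rest ih =>
    rw [List.foldl_cons, ih, step_eq]
    show (acc ++ pvGo [i]) ++ pvGo rest = acc ++ pvGo (i :: rest)
    simp only [pvGo, List.append_assoc]
    cases h : (pvRules.filter (fun r => PySem.Str.isIn r.1 (PySem.Str.lower i))).map (fun r => r.2) with
    | nil => simp
    | cons hd tl => cases hd; simp

-- ===== VERDICT (by name: the statement is the Claim_ definition above) =====
theorem identify_adjustments_py_spec : Claim_equal_identify_adjustments_py := by
  intro cs fa _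
  unfold Spec_identify_adjustments_py identify_adjustments_py identify_adjustments_py_alt
  simpa using foldl_eq_pvGo ((PySem.Dict.mk fa).getD "key_issues" []) []
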